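-- pv_equiv track=rewrite | github.com/afzalsiddique/problem-solving | Problem_Solving_Python/template/helper.py | nextGreaterOrEqualIndex
-- ===== SOURCE A (Python) =====
-- def nextGreaterOrEqualIndex(arr):
--     # leetcode 975
--     # this function finds next greater index. since it is sorted in ascending order, the next greater index
--     # in this case will be the next smallest element of the greater elements in the smallest index.
--     # also when sorted in descending order, it will find next smaller element of the smaller elements in the smallest index
--     # check other solution for details
--     n=len(arr)
--     indices=sorted(range(n),key=lambda x:arr[x])
--     n = len(indices)
--     next_higher_or_equal = [-1]*n
--     st = []
--     for i in range(n):
--         while st and indices[st[-1]] < indices[i]: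
--             next_higher_or_equal[indices[st.pop()]] = indices[i]
--         st.append(i)
--     return next_higher_or_equal
-- ===== SOURCE B (Python) =====
-- def nextGreaterOrEqualIndex(arr):
--     # direct scan: for each j, the index to its right holding the smallest
--     # value >= arr[j] (ties broken toward the smallest index)
--     n = len(arr)
--     res = []
--     for j in range(n):
--         best = -1
--         for c in range(j + 1, n):
--             if arr[c] >= arr[j] and (best == -1 or arr[c] < arr[best]):
--                 best = c
--         res.append(best)
--     return res
-- ===== Notes on version B (the rewrite author's own statement) =====
-- stated objective: simpler
-- what changed: Replaced the stable sort of indices plus monotonic-stack pass by a direct nested scan that, for each position, picks the rightward index holding the smallest value >= the current one (ties toward the smallest index).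
import Mathlib
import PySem

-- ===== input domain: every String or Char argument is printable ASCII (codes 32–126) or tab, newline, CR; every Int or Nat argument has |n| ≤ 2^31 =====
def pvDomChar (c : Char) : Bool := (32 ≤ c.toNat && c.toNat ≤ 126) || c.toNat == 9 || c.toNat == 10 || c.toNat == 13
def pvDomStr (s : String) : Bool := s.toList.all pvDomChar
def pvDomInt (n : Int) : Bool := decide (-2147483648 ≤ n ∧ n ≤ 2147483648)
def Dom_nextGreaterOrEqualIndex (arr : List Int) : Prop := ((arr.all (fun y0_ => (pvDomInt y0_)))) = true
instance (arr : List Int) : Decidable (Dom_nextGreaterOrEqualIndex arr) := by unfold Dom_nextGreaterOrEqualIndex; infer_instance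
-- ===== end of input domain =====

-- B replaces A's stable index sort + monotonic stack by a direct nested scan
-- (per position, pick the rightward index of the smallest value ≥ the current
-- one, ties toward the smallest index); simpler, not faster (O(n^2) vs O(n log n)).


-- ===== PORT A =====
def pvPopLoopA (indices : List Int) (v : Int) : List Int → List Int → List Int × List Int
  | [], nxt => (nxt, [])
  | j :: rest, nxt =>
    if PySem.List.pyGetD indices j 0 < v then
      pvPopLoopA indices v rest (PySem.List.pySetD nxt (PySem.List.pyGetD indices j 0) v)
    else (nxt, j :: rest)

-- port of A: sort the indices by value (stable), then a monotonic-stack pass;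
-- the Python stack st is the Lean list (top = head); arr[x]/next[k]=v are exact
-- via pyGetD/pySetD since every index is in range
def nextGreaterOrEqualIndex (arr : List Int) : List Int :=
  let n : Int := arr.length
  let indices := PySem.List.sorted (PySem.List.pyRange 0 n 1) (fun x => PySem.List.pyGetD arr x 0) false
  let n2 : Int := indices.length
  let init : List Int := PySem.List.pyRepeat [-1] n2
  (((PySem.List.pyRange 0 n2 1).foldl
      (fun (s : List Int × List Int) (i : Int) =>
        let p := pvPopLoopA indices (PySem.List.pyGetD indices i 0) s.2 s.1
        (p.1, i :: p.2))
      (init, []))).1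

-- ===== PORT B =====
-- port of B: for each j scan c = j+1 .. n-1 keeping the best candidate
def nextGreaterOrEqualIndex_alt (arr : List Int) : List Int :=
  let n : Int := arr.length
  (PySem.List.pyRange 0 n 1).foldl
    (fun res j =>
      res ++ [(PySem.List.pyRange (j + 1) n 1).foldl
        (fun best c =>
          if PySem.List.pyGetD arr j 0 ≤ PySem.List.pyGetD arr c 0 ∧
             (best = -1 ∨ PySem.List.pyGetD arr c 0 < PySem.List.pyGetD arr best 0)
          then c else best)
        (-1)]) []

-- ===== PRECONDITION & SPEC =====
def Spec_nextGreaterOrEqualIndex (arr : List Int) (out : List Int) : Prop := out = nextGreaterOrEqualIndex_alt arr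
instance (arr : List Int) (out : List Int) : Decidable (Spec_nextGreaterOrEqualIndex arr out) := by unfold Spec_nextGreaterOrEqualIndex; infer_instance

-- ===== CLAIM (what is proved, stated in full; the proofs are below) =====
def Claim_equal_nextGreaterOrEqualIndex : Prop := ∀ (arr : List Int), Dom_nextGreaterOrEqualIndex arr → Spec_nextGreaterOrEqualIndex arr (nextGreaterOrEqualIndex arr)

-- ===== LEMMAS AND PROOFS =====


-- value of arr at an index (total form used by both ports; exact on in-range indices)
def pvKey (arr : List Int) (x : Int) : Int := PySem.List.pyGetD arr x 0

-- strict "stable-sort order" on indices: by value, ties by index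
def pvLex (arr : List Int) (a b : Int) : Prop :=
  pvKey arr a < pvKey arr b ∨ (pvKey arr a = pvKey arr b ∧ a < b)

-- the sorted index list built by A
def pvIdx (arr : List Int) : List Int :=
  PySem.List.sorted (PySem.List.pyRange 0 (arr.length : Int) 1) (fun x => PySem.List.pyGetD arr x 0) false

-- A's per-position specification: first value after position j (in the sorted
-- index list I) that exceeds I[j], else -1
def pvF (I : List Int) (j : Nat) : Int :=
  (((I.drop (j+1)).find? (fun v => decide (I.getD j 0 < v))).getD (-1))

-- B's specification up to a right bound b: best = -1 and no candidate, or best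
-- is the lex-minimal candidate c of k with k < c < b
def pvSpecB (arr : List Int) (k b best : Int) : Prop :=
  (best = -1 ∧ ∀ c : Int, k < c → c < b → ¬ pvKey arr k ≤ pvKey arr c) ∨
  (k < best ∧ best < b ∧ pvKey arr k ≤ pvKey arr best ∧
    ∀ c : Int, k < c → c < b → pvKey arr k ≤ pvKey arr c → c = best ∨ pvLex arr best c)

-- B's full specification for index k
def pvSpec (arr : List Int) (k best : Int) : Prop := pvSpecB arr k (arr.length : Int) best

-- ---- part 1: the stable sort of distinct indices is Pairwise pvLex ----

lemma pv_insertBy_lex (arr : List Int) (x : Int) (acc : List Int)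
    (hacc : acc.Pairwise (pvLex arr)) (hlt : ∀ y ∈ acc, y < x) :
    (PySem.List.insertBy (fun a b => decide (pvKey arr a < pvKey arr b)) x acc).Pairwise (pvLex arr) := by
  induction acc with
  | nil => simp [PySem.List.insertBy]
  | cons y t ih =>
    rcases List.pairwise_cons.mp hacc with ⟨h1, h2⟩
    by_cases hb : pvKey arr x < pvKey arr y
    · simp only [PySem.List.insertBy, hb, decide_true, if_true]
      refine List.pairwise_cons.mpr ⟨?_, hacc⟩
      intro z hz
      rcases List.mem_cons.mp hz with rfl | hz
      · exact Or.inl hb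
      · rcases h1 z hz with h | ⟨h, _⟩
        · exact Or.inl (lt_trans hb h)
        · exact Or.inl (h ▸ hb)
    · simp only [PySem.List.insertBy, hb, decide_false, if_false, Bool.false_eq_true]
      refine List.pairwise_cons.mpr ⟨?_, ih h2 (fun z hz => hlt z (List.mem_cons_of_mem _ hz))⟩
      intro z hz
      rcases (PySem.List.mem_insertBy _ _ _ _).mp hz with rfl | hz
      · rcases lt_or_eq_of_le (not_lt.mp hb) with h | h
        · exact Or.inl h
        · exact Or.inr ⟨h, hlt y (List.mem_cons_self)⟩
      · exact h1 z hz

lemma pv_foldl_insertBy_lex (arr : List Int) (xs acc : List Int)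
    (hacc : acc.Pairwise (pvLex arr))
    (hmix : ∀ y ∈ acc, ∀ x ∈ xs, y < x) (hxs : xs.Pairwise (· < ·)) :
    (xs.foldl (fun acc x => PySem.List.insertBy (fun a b => decide (pvKey arr a < pvKey arr b)) x acc) acc).Pairwise (pvLex arr) := by
  induction xs generalizing acc with
  | nil => exact hacc
  | cons x xs ih =>
    rcases List.pairwise_cons.mp hxs with ⟨hx1, hx2⟩
    simp only [List.foldl_cons]
    refine ih _ ?_ ?_ hx2
    · exact pv_insertBy_lex arr x acc hacc (fun y hy => hmix y hy x List.mem_cons_self)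
    · intro y hy x' hx'
      rcases (PySem.List.mem_insertBy _ _ _ _).mp hy with rfl | hy
      · exact hx1 x' hx'
      · exact hmix y hy x' (List.mem_cons_of_mem _ hx')

lemma pvIdx_pairwise (arr : List Int) : (pvIdx arr).Pairwise (pvLex arr) := by
  unfold pvIdx
  rw [PySem.List.sorted_eq_foldl_insertBy]
  exact pv_foldl_insertBy_lex arr _ [] List.Pairwise.nil (by simp)
    (PySem.List.pairwise_lt_pyRange_one 0 _)

lemma pvIdx_perm (arr : List Int) :
    (pvIdx arr).Perm (PySem.List.pyRange 0 (arr.length : Int) 1) :=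
  PySem.List.sorted_perm _ _ _

lemma pvIdx_length (arr : List Int) : (pvIdx arr).length = arr.length := by
  rw [(pvIdx_perm arr).length_eq, PySem.List.length_pyRange_one]
  omega

lemma pvIdx_mem (arr : List Int) (x : Int) :
    x ∈ pvIdx arr ↔ 0 ≤ x ∧ x < (arr.length : Int) := by
  rw [(pvIdx_perm arr).mem_iff, PySem.List.mem_pyRange_one]

lemma pvIdx_nodup (arr : List Int) : (pvIdx arr).Nodup := by
  exact (pvIdx_perm arr).nodup_iff.mpr (PySem.List.nodup_pyRange_one 0 _)

-- ---- part 2: the stack loop computes pvF ----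

-- the main-loop state after the first m iterations
def pvLoopA (I : List Int) (m : Nat) : List Int × List Int :=
  (PySem.List.pyRange 0 (m : Int) 1).foldl
    (fun (s : List Int × List Int) (i : Int) =>
      let p := pvPopLoopA I (PySem.List.pyGetD I i 0) s.2 s.1
      (p.1, i :: p.2))
    (List.replicate I.length (-1), [])

-- loop invariant after m iterations
def pvInv (I : List Int) (m : Nat) : Prop :=
  (∀ j ∈ (pvLoopA I m).2, 0 ≤ j ∧ j < (m : Int)) ∧
  (pvLoopA I m).2.Pairwise (fun a b => b < a) ∧
  (∀ j : Nat, j < I.length →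
     ((j : Int) ∈ (pvLoopA I m).2 ↔ j < m ∧ ∀ l : Nat, j < l → l < m → I.getD l 0 < I.getD j 0)) ∧
  (pvLoopA I m).1.length = I.length ∧
  (∀ j : Nat, j < I.length →
     (pvLoopA I m).1.getD (I.getD j 0).toNat 0 =
       if j < m ∧ ∃ l < m, j < l ∧ I.getD j 0 < I.getD l 0 then pvF I j else -1)

lemma pv_getD_set (l : List Int) (i k : Nat) (v d : Int) (h : i < l.length) :
    (l.set i v).getD k d = if i = k then v else l.getD k d := by
  by_cases hik : i = k
  · subst hik; simp [List.getD_eq_getElem?_getD, h]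
  · simp [List.getD_eq_getElem?_getD, hik]

lemma pv_foldl_set_id (I : List Int) (v : Int) (st nxt : List Int)
    (h : ∀ x ∈ st, ¬ I.getD x.toNat 0 < v) :
    st.foldl (fun acc j => if I.getD j.toNat 0 < v then acc.set (I.getD j.toNat 0).toNat v else acc) nxt = nxt := by
  induction st generalizing nxt with
  | nil => rfl
  | cons j rest ih =>
    rw [List.foldl_cons, if_neg (h j List.mem_cons_self)]
    exact ih _ (fun x hx => h x (List.mem_cons_of_mem _ hx))

lemma pv_foldl_set_length (I : List Int) (v : Int) (st nxt : List Int) :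
    (st.foldl (fun acc j => if I.getD j.toNat 0 < v then acc.set (I.getD j.toNat 0).toNat v else acc) nxt).length = nxt.length := by
  induction st generalizing nxt with
  | nil => rfl
  | cons j rest ih =>
    rw [List.foldl_cons]
    by_cases hc : I.getD j.toNat 0 < v
    · rw [if_pos hc, ih]; exact List.length_set
    · rw [if_neg hc, ih]

lemma pv_foldl_set_getD (I : List Int) (v : Int) (st nxt : List Int) (k : Nat)
    (hrange : ∀ j ∈ st, (I.getD j.toNat 0).toNat < nxt.length) :
    (st.foldl (fun acc j => if I.getD j.toNat 0 < v then acc.set (I.getD j.toNat 0).toNat v else acc) nxt).getD k 0 =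
      if ∃ j ∈ st, I.getD j.toNat 0 < v ∧ (I.getD j.toNat 0).toNat = k then v else nxt.getD k 0 := by
  induction st generalizing nxt with
  | nil => simp
  | cons j rest ih =>
    rw [List.foldl_cons]
    by_cases hc : I.getD j.toNat 0 < v
    · rw [if_pos hc]
      rw [ih _ (fun x hx => by rw [List.length_set]; exact hrange x (List.mem_cons_of_mem _ hx))]
      by_cases hex : ∃ x ∈ rest, I.getD x.toNat 0 < v ∧ (I.getD x.toNat 0).toNat = k
      · rw [if_pos hex, if_pos]
        rcases hex with ⟨x, hx, h1, h2⟩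
        exact ⟨x, List.mem_cons_of_mem _ hx, h1, h2⟩
      · rw [if_neg hex, pv_getD_set _ _ _ _ _ (hrange j List.mem_cons_self)]
        by_cases hk : (I.getD j.toNat 0).toNat = k
        · rw [if_pos hk, if_pos ⟨j, List.mem_cons_self, hc, hk⟩]
        · rw [if_neg hk, if_neg]
          intro ⟨x, hx, h1, h2⟩
          rcases List.mem_cons.mp hx with rfl | hx'
          · exact hk h2
          · exact hex ⟨x, hx', h1, h2⟩
    · rw [if_neg hc, ih _ (fun x hx => hrange x (List.mem_cons_of_mem _ hx))]
      congr 1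
      simp only [eq_iff_iff]
      constructor
      · intro ⟨x, hx, h1, h2⟩; exact ⟨x, List.mem_cons_of_mem _ hx, h1, h2⟩
      · intro ⟨x, hx, h1, h2⟩
        rcases List.mem_cons.mp hx with rfl | hx'
        · exact absurd h1 hc
        · exact ⟨x, hx', h1, h2⟩

lemma pv_popLoop_spec (I : List Int) (v : Int) (st nxt : List Int)
    (hp : ∀ j ∈ st, 0 ≤ j)
    (hvals : st.Pairwise (fun a b => I.getD a.toNat 0 < I.getD b.toNat 0))
    (hnn : ∀ j ∈ st, 0 ≤ I.getD j.toNat 0) :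
    pvPopLoopA I v st nxt =
      (st.foldl (fun acc j => if I.getD j.toNat 0 < v then acc.set (I.getD j.toNat 0).toNat v else acc) nxt,
       st.filter (fun j => !decide (I.getD j.toNat 0 < v))) := by
  induction st generalizing nxt with
  | nil => rfl
  | cons j rest ih =>
    have hj0 : 0 ≤ j := hp j List.mem_cons_self
    have hg : PySem.List.pyGetD I j 0 = I.getD j.toNat 0 := by
      rw [show j = ((j.toNat : Nat) : Int) by omega, PySem.List.pyGetD_natCast, Int.toNat_natCast]
    rcases List.pairwise_cons.mp hvals with ⟨hhead, htail⟩
    by_cases hc : I.getD j.toNat 0 < v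
    · rw [show pvPopLoopA I v (j :: rest) nxt =
          (if PySem.List.pyGetD I j 0 < v then
            pvPopLoopA I v rest (PySem.List.pySetD nxt (PySem.List.pyGetD I j 0) v)
          else (nxt, j :: rest)) from rfl]
      rw [hg, if_pos hc, PySem.List.pySetD_of_nonneg _ _ (hnn j List.mem_cons_self)]
      rw [ih _ (fun x hx => hp x (List.mem_cons_of_mem _ hx)) htail
          (fun x hx => hnn x (List.mem_cons_of_mem _ hx))]
      rw [List.foldl_cons, if_pos hc, List.filter_cons, if_neg (by simpa using hc)]
    · rw [show pvPopLoopA I v (j :: rest) nxt =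
          (if PySem.List.pyGetD I j 0 < v then
            pvPopLoopA I v rest (PySem.List.pySetD nxt (PySem.List.pyGetD I j 0) v)
          else (nxt, j :: rest)) from rfl]
      rw [hg, if_neg hc]
      have hall : ∀ x ∈ rest, ¬ I.getD x.toNat 0 < v := by
        intro x hx h
        exact hc (lt_trans (hhead x hx) h)
      rw [List.foldl_cons, if_neg hc, pv_foldl_set_id _ _ _ _ hall, List.filter_cons,
          if_pos (by simpa using hc), List.filter_eq_self.mpr (fun x hx => by simpa using hall x hx)]

lemma pv_find_eq (I : List Int) (j m : Nat) (hj : j < m) (hm : m < I.length)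
    (hmid : ∀ l : Nat, j < l → l < m → I.getD l 0 < I.getD j 0)
    (hgt : I.getD j 0 < I.getD m 0) : pvF I j = I.getD m 0 := by
  unfold pvF
  have hdd : List.drop (m - (j+1)) (List.drop (j+1) I) = List.drop m I := by
    rw [List.drop_drop]; congr 1; omega
  have hsplit : I.drop (j+1) =
      (I.drop (j+1)).take (m - (j+1)) ++ (I[m] :: I.drop (m+1)) := by
    rw [← List.drop_eq_getElem_cons hm, ← hdd, List.take_append_drop]
  rw [hsplit, List.find?_append]
  have h1 : ((I.drop (j+1)).take (m - (j+1))).find? (fun v => decide (I.getD j 0 < v)) = none := by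
    apply List.find?_eq_none.mpr
    intro x hx
    rcases List.mem_iff_getElem.mp hx with ⟨t, ht, hxe⟩
    have ht1 : t < m - (j+1) := by
      have := List.length_take (i := m - (j+1)) (l := I.drop (j+1)); omega
    have ht2 : j + 1 + t < I.length := by
      have := List.length_drop (l := I) (i := j+1)
      have := List.length_take (i := m - (j+1)) (l := I.drop (j+1)); omega
    have hxv : x = I.getD (j+1+t) 0 := by
      rw [← hxe, List.getElem_take, List.getD_eq_getElem _ _ ht2]
      exact List.getElem_drop
    have := hmid (j+1+t) (by omega) (by omega)
    rw [hxv]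
    simp only [decide_eq_true_eq, not_lt]
    omega
  rw [h1, Option.none_or]
  have h2 : decide (I.getD j 0 < I[m]) = true := by
    rw [← List.getD_eq_getElem _ _ hm]
    exact decide_eq_true hgt
  rw [List.find?_cons_of_pos (p := fun v => decide (I.getD j 0 < v)) h2, Option.getD_some, List.getD_eq_getElem _ _ hm]

lemma pv_find_none (I : List Int) (j : Nat) (hj : j < I.length)
    (hnone : ∀ l : Nat, j < l → l < I.length → I.getD l 0 < I.getD j 0) : pvF I j = -1 := by
  unfold pvF
  have h1 : (I.drop (j+1)).find? (fun v => decide (I.getD j 0 < v)) = none := by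
    apply List.find?_eq_none.mpr
    intro x hx
    rcases List.mem_iff_getElem.mp hx with ⟨t, ht, hxe⟩
    have ht2 : j + 1 + t < I.length := by
      have := List.length_drop (l := I) (i := j+1); omega
    have hxv : x = I.getD (j+1+t) 0 := by
      rw [← hxe, List.getD_eq_getElem _ _ ht2]
      exact List.getElem_drop
    have := hnone (j+1+t) (by omega) ht2
    rw [hxv]
    simp only [decide_eq_true_eq, not_lt]
    omega
  rw [h1]
  rfl

lemma pvLoopA_succ (I : List Int) (m : Nat) :
    pvLoopA I (m+1) =
      ((pvPopLoopA I (PySem.List.pyGetD I (m : Int) 0) (pvLoopA I m).2 (pvLoopA I m).1).1,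
       (m : Int) :: (pvPopLoopA I (PySem.List.pyGetD I (m : Int) 0) (pvLoopA I m).2 (pvLoopA I m).1).2) := by
  unfold pvLoopA
  rw [show ((m + 1 : Nat) : Int) = (m : Int) + 1 by push_cast; ring,
      PySem.List.pyRange_one_succ_right (by exact_mod_cast Nat.zero_le m),
      List.foldl_append, List.foldl_cons, List.foldl_nil]

lemma pv_inv_holds (I : List Int)
    (hr : ∀ j : Nat, j < I.length → 0 ≤ I.getD j 0 ∧ I.getD j 0 < (I.length : Int))
    (hinj : ∀ j1 j2 : Nat, j1 < I.length → j2 < I.length → I.getD j1 0 = I.getD j2 0 → j1 = j2)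
    (m : Nat) (hm : m ≤ I.length) : pvInv I m := by
  induction m with
  | zero =>
    have h0 : pvLoopA I 0 = (List.replicate I.length (-1), []) := by
      unfold pvLoopA
      rw [show ((0 : Nat) : Int) = 0 from rfl, PySem.List.pyRange_one_eq_nil le_rfl]
      rfl
    unfold pvInv
    rw [h0]
    refine ⟨by simp, by simp, fun j hj => by simp, by simp, fun j hj => ?_⟩
    rw [if_neg (by simp)]
    exact List.getD_replicate _ (by have := hr j hj; omega)
  | succ m ih =>
    have hmlt : m < I.length := hm
    obtain ⟨ih1, ih2, ih3, ih4, ih5⟩ := ih (Nat.le_of_succ_le hm)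
    have hg : PySem.List.pyGetD I (m : Int) 0 = I.getD m 0 := PySem.List.pyGetD_natCast _ _ _
    have hp : ∀ j ∈ (pvLoopA I m).2, 0 ≤ j := fun j hj => (ih1 j hj).1
    have hlt' : ∀ j ∈ (pvLoopA I m).2, j.toNat < m := by
      intro j hj
      have := ih1 j hj; omega
    have hmemN : ∀ j ∈ (pvLoopA I m).2, j = ((j.toNat : Nat) : Int) := by
      intro j hj; have := hp j hj; omega
    have hnn : ∀ j ∈ (pvLoopA I m).2, 0 ≤ I.getD j.toNat 0 := by
      intro j hj
      exact (hr j.toNat (by have := hlt' j hj; omega)).1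
    have hvals : (pvLoopA I m).2.Pairwise (fun a b => I.getD a.toNat 0 < I.getD b.toNat 0) := by
      refine List.Pairwise.imp_of_mem ?_ ih2
      intro a b ha hb hba
      have hbm := (ih3 b.toNat (by have := hlt' b hb; omega)).mp (by rw [← hmemN b hb]; exact hb)
      exact hbm.2 a.toNat (by have := hp b hb; have := hp a ha; omega) (hlt' a ha)
    have hpop := pv_popLoop_spec I (I.getD m 0) (pvLoopA I m).2 (pvLoopA I m).1 hp hvals hnn
    have hNew : pvLoopA I (m+1) =
        ((pvLoopA I m).2.foldl
           (fun acc j => if I.getD j.toNat 0 < I.getD m 0 then acc.set (I.getD j.toNat 0).toNat (I.getD m 0) else acc)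
           (pvLoopA I m).1,
         (m : Int) :: (pvLoopA I m).2.filter (fun j => !decide (I.getD j.toNat 0 < I.getD m 0))) := by
      rw [pvLoopA_succ, hg, hpop]
    have hfmem : ∀ j : Int, j ∈ (pvLoopA I m).2.filter (fun j => !decide (I.getD j.toNat 0 < I.getD m 0)) ↔
        j ∈ (pvLoopA I m).2 ∧ ¬ I.getD j.toNat 0 < I.getD m 0 := by
      intro j; rw [List.mem_filter]; simp
    have hvdistinct : ∀ j : Nat, j < I.length → j ≠ m → I.getD j 0 ≠ I.getD m 0 := by
      intro j hj hne heq
      exact hne (hinj j m hj hmlt heq)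
    unfold pvInv
    rw [hNew]
    refine ⟨?_, ?_, ?_, ?_, ?_⟩
    · -- (i) bounds
      intro j hj
      rcases List.mem_cons.mp hj with rfl | hj'
      · constructor <;> [exact_mod_cast Nat.zero_le m; exact_mod_cast Nat.lt_succ_self m]
      · have := ih1 j ((hfmem j).mp hj').1
        push_cast; omega
    · -- (ii) positions strictly decrease along the stack
      refine List.pairwise_cons.mpr ⟨?_, List.Pairwise.filter _ ih2⟩
      intro b hb
      have := ih1 b ((hfmem b).mp hb).1
      omega
    · -- (iii) stack membership characterisation
      intro j hj
      constructor
      · intro hmem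
        rcases List.mem_cons.mp hmem with heq | hj'
        · have : j = m := by exact_mod_cast heq
          subst this
          exact ⟨Nat.lt_succ_self j, fun l hl1 hl2 => by omega⟩
        · obtain ⟨hin, hge⟩ := (hfmem _).mp hj'
          have hjN : ((j : Int)).toNat = j := by omega
          rw [hjN] at hge
          obtain ⟨hjm, hmid⟩ := (ih3 j hj).mp hin
          refine ⟨by omega, fun l hl1 hl2 => ?_⟩
          rcases Nat.lt_or_ge l m with h | h
          · exact hmid l hl1 h
          · have : l = m := by omega
            subst this
            have := hvdistinct j hj (by omega)
            omega
      · intro ⟨hjm, hmid⟩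
        rcases Nat.lt_or_ge j m with h | h
        · refine List.mem_cons_of_mem _ ((hfmem _).mpr ⟨(ih3 j hj).mpr ⟨h, fun l hl1 hl2 => hmid l hl1 (by omega)⟩, ?_⟩)
          have hjN : ((j : Int)).toNat = j := by omega
          rw [hjN]
          have := hmid m h (by omega)
          omega
        · have : j = m := by omega
          subst this
          exact List.mem_cons_self
    · -- (iv) length
      rw [pv_foldl_set_length]
      exact ih4
    · -- (v) next-array characterisation
      intro j hj
      have hrangeN : ∀ x ∈ (pvLoopA I m).2, (I.getD x.toNat 0).toNat < (pvLoopA I m).1.length := by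
        intro x hx
        have := hr x.toNat (by have := hlt' x hx; omega)
        omega
      rw [pv_foldl_set_getD _ _ _ _ _ hrangeN]
      by_cases hex : ∃ x ∈ (pvLoopA I m).2, I.getD x.toNat 0 < I.getD m 0 ∧ (I.getD x.toNat 0).toNat = (I.getD j 0).toNat
      · rcases hex with ⟨x, hx, hcond, hkx⟩
        have hxN : x.toNat < I.length := by have := hlt' x hx; omega
        have hveq : I.getD x.toNat 0 = I.getD j 0 := by
          have h1 := hr x.toNat hxN
          have h2 := hr j hj
          omega
        have hxj : x.toNat = j := hinj _ _ hxN hj hveq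
        rw [if_pos ⟨x, hx, hcond, hkx⟩]
        rw [hveq] at hcond
        obtain ⟨hjm, hmid⟩ := (ih3 j hj).mp (by rw [← hxj, ← hmemN x hx]; exact hx)
        rw [if_pos ⟨by omega, m, by omega, by omega, hcond⟩]
        exact (pv_find_eq I j m hjm hmlt hmid hcond).symm
      · rw [if_neg hex, ih5 j hj]
        by_cases hold : j < m ∧ ∃ l < m, j < l ∧ I.getD j 0 < I.getD l 0
        · rw [if_pos hold]
          rcases hold with ⟨h1, l, h2, h3, h4⟩
          rw [if_pos ⟨by omega, l, by omega, h3, h4⟩]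
        · rw [if_neg hold, if_neg ?_]
          intro ⟨hj1, l, hl1, hl2, hl3⟩
          rcases Nat.lt_or_ge l m with h | h
          · exact hold ⟨by omega, l, h, hl2, hl3⟩
          · have hl3' : I.getD j 0 < I.getD m 0 := by
              rw [show m = l by omega]; exact hl3
            have hjm : j < m := by omega
            have hmid : ∀ l' : Nat, j < l' → l' < m → I.getD l' 0 < I.getD j 0 := by
              intro l' hl'1 hl'2
              have hne2 : I.getD l' 0 ≠ I.getD j 0 := fun heq => (by omega : l' ≠ j) (hinj l' j (by omega) hj heq)
              by_contra hcon
              exact hold ⟨hjm, l', hl'2, hl'1, by omega⟩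
            have hin : (j : Int) ∈ (pvLoopA I m).2 := (ih3 j hj).mpr ⟨hjm, hmid⟩
            exact hex ⟨(j : Int), hin, by rw [Int.toNat_natCast]; exact hl3', by rw [Int.toNat_natCast]⟩

-- A's output, entrywise
lemma pvA_spec (arr : List Int) :
    (nextGreaterOrEqualIndex arr).length = arr.length ∧
    ∀ j : Nat, j < (pvIdx arr).length →
      (nextGreaterOrEqualIndex arr).getD ((pvIdx arr).getD j 0).toNat 0 = pvF (pvIdx arr) j := by
  have hA : nextGreaterOrEqualIndex arr = (pvLoopA (pvIdx arr) ((pvIdx arr).length)).1 := by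
    show (List.foldl
        (fun (s : List Int × List Int) (i : Int) =>
          let p := pvPopLoopA (pvIdx arr) (PySem.List.pyGetD (pvIdx arr) i 0) s.2 s.1
          (p.1, i :: p.2))
        (PySem.List.pyRepeat [-1] (((pvIdx arr).length : Nat) : Int), [])
        (PySem.List.pyRange 0 (((pvIdx arr).length : Nat) : Int) 1)).1 = _
    rw [PySem.List.pyRepeat_singleton, Int.toNat_natCast]
    rfl
  have hlen := pvIdx_length arr
  have hr : ∀ j : Nat, j < (pvIdx arr).length →
      0 ≤ (pvIdx arr).getD j 0 ∧ (pvIdx arr).getD j 0 < (((pvIdx arr).length : Nat) : Int) := by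
    intro j hj
    have hm : (pvIdx arr).getD j 0 ∈ pvIdx arr := by
      rw [List.getD_eq_getElem _ _ hj]; exact List.getElem_mem hj
    have := (pvIdx_mem arr _).mp hm
    omega
  have hinj : ∀ j1 j2 : Nat, j1 < (pvIdx arr).length → j2 < (pvIdx arr).length →
      (pvIdx arr).getD j1 0 = (pvIdx arr).getD j2 0 → j1 = j2 := by
    intro j1 j2 h1 h2 heq
    rw [List.getD_eq_getElem _ _ h1, List.getD_eq_getElem _ _ h2] at heq
    exact ((pvIdx_nodup arr).getElem_inj_iff).mp heq
  obtain ⟨_, _, _, i4, i5⟩ := pv_inv_holds (pvIdx arr) hr hinj ((pvIdx arr).length) le_rfl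
  refine ⟨by rw [hA, i4, hlen], fun j hj => ?_⟩
  rw [hA, i5 j hj]
  by_cases hc : j < (pvIdx arr).length ∧
      ∃ l < (pvIdx arr).length, j < l ∧ (pvIdx arr).getD j 0 < (pvIdx arr).getD l 0
  · rw [if_pos hc]
  · rw [if_neg hc]
    refine (pv_find_none _ j hj ?_).symm
    intro l hl1 hl2
    have hne : (pvIdx arr).getD l 0 ≠ (pvIdx arr).getD j 0 := fun heq =>
      (by omega : l ≠ j) (hinj l j hl2 hj heq)
    by_contra hcon
    exact hc ⟨hj, l, hl2, hl1, by omega⟩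

-- ---- part 3: B's inner loop satisfies pvSpec ----

lemma pvB_aux (arr : List Int) (k : Int) (hk : 0 ≤ k) (d : Nat) :
    pvSpecB arr k (k + 1 + (d : Int))
      ((PySem.List.pyRange (k + 1) (k + 1 + (d : Int)) 1).foldl
        (fun best c =>
          if PySem.List.pyGetD arr k 0 ≤ PySem.List.pyGetD arr c 0 ∧
             (best = -1 ∨ PySem.List.pyGetD arr c 0 < PySem.List.pyGetD arr best 0)
          then c else best)
        (-1)) := by
  induction d with
  | zero =>
    rw [show ((0 : Nat) : Int) = 0 by rfl, add_zero, PySem.List.pyRange_one_eq_nil le_rfl]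
    exact Or.inl ⟨rfl, fun c h1 h2 => by omega⟩
  | succ d ih =>
    rw [show (((d + 1 : Nat)) : Int) = (d : Int) + 1 by push_cast; ring,
        show k + 1 + ((d : Int) + 1) = (k + 1 + (d : Int)) + 1 by ring,
        PySem.List.pyRange_one_succ_right (by omega), List.foldl_append, List.foldl_cons,
        List.foldl_nil]
    set u : Int := k + 1 + (d : Int) with hu
    set best := ((PySem.List.pyRange (k + 1) u 1).foldl
        (fun best c =>
          if PySem.List.pyGetD arr k 0 ≤ PySem.List.pyGetD arr c 0 ∧
             (best = -1 ∨ PySem.List.pyGetD arr c 0 < PySem.List.pyGetD arr best 0)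
          then c else best)
        (-1)) with hbest
    have hkk : PySem.List.pyGetD arr k 0 = pvKey arr k := rfl
    have huu : PySem.List.pyGetD arr u 0 = pvKey arr u := rfl
    rcases ih with ⟨hb1, hnone⟩ | ⟨hkb, hbu, hkey, hmin⟩
    · by_cases hc : pvKey arr k ≤ pvKey arr u
      · rw [if_pos ⟨hkk ▸ huu ▸ hc, Or.inl hb1⟩]
        refine Or.inr ⟨by omega, by omega, hc, fun c h1 h2 h3 => ?_⟩
        rcases lt_or_eq_of_le (show c ≤ u by omega) with h | h
        · exact absurd h3 (hnone c h1 h)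
        · exact Or.inl h
      · rw [if_neg (by rw [hkk, huu]; tauto)]
        refine Or.inl ⟨hb1, fun c h1 h2 h3 => ?_⟩
        rcases lt_or_eq_of_le (show c ≤ u by omega) with h | h
        · exact hnone c h1 h h3
        · exact hc (h ▸ h3)
    · have hbne : ¬ best = -1 := by omega
      by_cases hc : pvKey arr k ≤ pvKey arr u ∧ pvKey arr u < pvKey arr best
      · rw [if_pos ⟨hkk ▸ huu ▸ hc.1, Or.inr (huu ▸ hc.2)⟩]
        refine Or.inr ⟨by omega, by omega, hc.1, fun c h1 h2 h3 => ?_⟩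
        rcases lt_or_eq_of_le (show c ≤ u by omega) with h | h
        · rcases hmin c h1 h h3 with rfl | hlex
          · exact Or.inr (Or.inl hc.2)
          · rcases hlex with hlex | ⟨hlex, _⟩
            · exact Or.inr (Or.inl (lt_trans hc.2 hlex))
            · exact Or.inr (Or.inl (hlex ▸ hc.2))
        · exact Or.inl h
      · rw [if_neg (by rw [hkk, huu]; intro hx; rcases hx with ⟨hx1, hx2 | hx2⟩ <;> [exact hbne hx2; exact hc ⟨hx1, hx2⟩])]
        refine Or.inr ⟨hkb, by omega, hkey, fun c h1 h2 h3 => ?_⟩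
        rcases lt_or_eq_of_le (show c ≤ u by omega) with h | h
        · exact hmin c h1 h h3
        · subst h
          rcases not_and_or.mp hc with hx | hx
          · exact absurd h3 hx
          · rcases lt_or_eq_of_le (not_lt.mp hx) with hlt | heq
            · exact Or.inr (Or.inl hlt)
            · exact Or.inr (Or.inr ⟨heq, hbu⟩)

lemma pvB_inner (arr : List Int) (k : Int) (hk : 0 ≤ k) :
    pvSpec arr k
      ((PySem.List.pyRange (k + 1) (arr.length : Int) 1).foldl
        (fun best c =>
          if PySem.List.pyGetD arr k 0 ≤ PySem.List.pyGetD arr c 0 ∧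
             (best = -1 ∨ PySem.List.pyGetD arr c 0 < PySem.List.pyGetD arr best 0)
          then c else best)
        (-1)) := by
  by_cases hkn : k + 1 ≤ (arr.length : Int)
  · have := pvB_aux arr k hk ((arr.length : Int) - (k + 1)).toNat
    rw [show k + 1 + ((((arr.length : Int) - (k + 1)).toNat : Int)) = (arr.length : Int) by omega] at this
    exact this
  · rw [PySem.List.pyRange_one_eq_nil (by omega)]
    exact Or.inl ⟨rfl, fun c h1 h2 => by omega⟩

lemma pvB_entries (arr : List Int) :
    (nextGreaterOrEqualIndex_alt arr).length = arr.length ∧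
    ∀ k : Nat, k < arr.length →
      pvSpec arr (k : Int) ((nextGreaterOrEqualIndex_alt arr).getD k 0) := by
  have hB : nextGreaterOrEqualIndex_alt arr =
      (PySem.List.pyRange 0 (arr.length : Int) 1).map
        (fun j => (PySem.List.pyRange (j + 1) (arr.length : Int) 1).foldl
          (fun best c =>
            if PySem.List.pyGetD arr j 0 ≤ PySem.List.pyGetD arr c 0 ∧
               (best = -1 ∨ PySem.List.pyGetD arr c 0 < PySem.List.pyGetD arr best 0)
            then c else best)
          (-1)) := by
    unfold nextGreaterOrEqualIndex_alt
    rw [PySem.List.foldl_append_singleton_eq_map]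
    rfl
  have hlen : (nextGreaterOrEqualIndex_alt arr).length = arr.length := by
    rw [hB, List.length_map, PySem.List.length_pyRange_one]; omega
  refine ⟨hlen, fun k hk => ?_⟩
  have hk' : k < (nextGreaterOrEqualIndex_alt arr).length := by omega
  rw [List.getD_eq_getElem _ _ hk']
  have hkr : k < ((PySem.List.pyRange 0 (arr.length : Int) 1)).length := by
    rw [PySem.List.length_pyRange_one]; omega
  simp only [hB, List.getElem_map, PySem.List.getElem_pyRange_one _ _ k hkr, zero_add]
  exact pvB_inner arr (k : Int) (by positivity)

-- ---- part 4: bridge — pvF of the sorted list satisfies pvSpec, and pvSpec is unique ----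

lemma pv_bridge (arr : List Int) (j : Nat) (hj : j < (pvIdx arr).length) :
    pvSpec arr ((pvIdx arr).getD j 0) (pvF (pvIdx arr) j) := by
  set I := pvIdx arr with hI
  have hlen : I.length = arr.length := pvIdx_length arr
  have hpw0 : I.Pairwise (pvLex arr) := hI ▸ pvIdx_pairwise arr
  have hmemI : ∀ c : Int, c ∈ I ↔ 0 ≤ c ∧ c < (arr.length : Int) := fun c => hI ▸ pvIdx_mem arr c
  have hj0 : 0 ≤ I.getD j 0 ∧ I.getD j 0 < (arr.length : Int) := by
    have hm : I.getD j 0 ∈ I := by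
      rw [List.getD_eq_getElem _ _ hj]; exact List.getElem_mem hj
    exact (hmemI _).mp hm
  have hpw : ∀ p q : Nat, q < I.length → p < q → pvLex arr (I.getD p 0) (I.getD q 0) := by
    intro p q hq hpq
    rw [List.getD_eq_getElem _ _ (show p < I.length by omega), List.getD_eq_getElem _ _ hq]
    exact List.pairwise_iff_getElem.mp hpw0 p q (by omega) hq hpq
  have hmem' : ∀ c : Int, c ∈ I → ∃ p : Nat, p < I.length ∧ I.getD p 0 = c := by
    intro c hc
    rcases List.mem_iff_getElem.mp hc with ⟨p, hp, hpc⟩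
    exact ⟨p, hp, by rw [List.getD_eq_getElem _ _ hp]; exact hpc⟩
  have hdget : ∀ t : Nat, t < (I.drop (j+1)).length →
      (I.drop (j+1)).getD t 0 = I.getD (j+1+t) 0 := by
    intro t ht
    have ht' : j + 1 + t < I.length := by
      have := List.length_drop (l := I) (i := j+1); omega
    rw [List.getD_eq_getElem _ _ ht, List.getD_eq_getElem _ _ ht']
    exact List.getElem_drop
  have hdlen : (I.drop (j+1)).length = I.length - (j+1) := List.length_drop
  -- every candidate sits strictly after position j in I
  have hcand : ∀ c : Int, I.getD j 0 < c → c < (arr.length : Int) →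
      pvKey arr (I.getD j 0) ≤ pvKey arr c →
      ∃ p : Nat, p < I.length ∧ j < p ∧ I.getD p 0 = c := by
    intro c h1 h2 h3
    have hcm : c ∈ I := (hmemI c).mpr ⟨by omega, h2⟩
    rcases hmem' c hcm with ⟨p, hp, hpc⟩
    refine ⟨p, hp, ?_, hpc⟩
    rcases lt_trichotomy p j with h | h | h
    · have hlx := hpw p j hj h
      rw [hpc] at hlx
      unfold pvLex at hlx
      rcases hlx with h' | ⟨h', h''⟩ <;> omega
    · subst h; omega
    · exact h
  cases hfind : (I.drop (j+1)).find? (fun v => decide (I.getD j 0 < v)) with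
  | none =>
    have hres : pvF I j = -1 := by unfold pvF; rw [hfind]; rfl
    rw [hres]
    refine Or.inl ⟨rfl, fun c h1 h2 h3 => ?_⟩
    rcases hcand c h1 h2 h3 with ⟨p, hp, hjp, hpc⟩
    have hmemd : c ∈ I.drop (j+1) := by
      have ht : p - (j+1) < (I.drop (j+1)).length := by omega
      have := hdget (p - (j+1)) ht
      rw [show j + 1 + (p - (j+1)) = p by omega, hpc] at this
      rw [← this, List.getD_eq_getElem _ _ ht]
      exact List.getElem_mem ht
    have := List.find?_eq_none.mp hfind c hmemd
    simp only [decide_eq_true_eq] at this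
    exact this h1
  | some v =>
    have hres : pvF I j = v := by unfold pvF; rw [hfind]; rfl
    rw [hres]
    rcases List.find?_eq_some_iff_append.mp hfind with ⟨hpv, as, bs, heq, has⟩
    have hkv : I.getD j 0 < v := by simpa using hpv
    have halen : as.length < (I.drop (j+1)).length := by rw [heq]; simp
    have hpveq : I.getD (j + 1 + as.length) 0 = v := by
      rw [← hdget as.length halen, heq, List.getD_eq_getElem _ _ (by rw [← heq]; exact halen)]
      rw [List.getElem_append_right (le_refl as.length)]
      simp
    have hvm : v ∈ I := by
      rw [← hpveq, List.getD_eq_getElem _ _ (show j + 1 + as.length < I.length by omega)]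
      exact List.getElem_mem _
    have hvb := (hmemI v).mp hvm
    have hlexkv : pvLex arr (I.getD j 0) v := by
      have := hpw j (j + 1 + as.length) (by omega) (by omega)
      rw [hpveq] at this
      exact this
    have hkey : pvKey arr (I.getD j 0) ≤ pvKey arr v := by unfold pvLex at hlexkv; omega
    refine Or.inr ⟨hkv, hvb.2, hkey, fun c h1 h2 h3 => ?_⟩
    rcases hcand c h1 h2 h3 with ⟨p, hp, hjp, hpc⟩
    rcases lt_trichotomy p (j + 1 + as.length) with h | h | h
    · -- c lies among as, which all fail the predicate: contradiction
      exfalso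
      have ht : p - (j+1) < as.length := by omega
      have hcas : c ∈ as := by
        have h5 := hdget (p - (j+1)) (by omega)
        rw [show j + 1 + (p - (j+1)) = p by omega, hpc] at h5
        rw [heq] at h5
        have h6 : (as ++ v :: bs).getD (p - (j+1)) 0 = as.getD (p - (j+1)) 0 := by
          rw [List.getD_eq_getElem _ _ (by simp; omega), List.getD_eq_getElem _ _ ht]
          exact List.getElem_append_left ht
        rw [h6] at h5
        rw [← h5, List.getD_eq_getElem _ _ ht]
        exact List.getElem_mem ht
      have := has c hcas
      simp only [Bool.not_eq_eq_eq_not, Bool.not_true, decide_eq_false_iff_not] at this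
      exact this h1
    · exact Or.inl (by rw [← hpc, ← hpveq, h])
    · have := hpw (j + 1 + as.length) p hp h
      rw [hpveq, hpc] at this
      exact Or.inr this

lemma pvSpec_unique (arr : List Int) (k b1 b2 : Int)
    (h1 : pvSpec arr k b1) (h2 : pvSpec arr k b2) : b1 = b2 := by
  rcases h1 with ⟨e1, n1⟩ | ⟨p1, q1, r1, m1⟩
  · rcases h2 with ⟨e2, _⟩ | ⟨p2, q2, r2, _⟩
    · omega
    · exact absurd r2 (n1 b2 p2 q2)
  · rcases h2 with ⟨e2, n2⟩ | ⟨p2, q2, r2, m2⟩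
    · exact absurd r1 (n2 b1 p1 q1)
    · rcases m1 b2 p2 q2 r2 with h | h
      · omega
      · rcases m2 b1 p1 q1 r1 with h' | h'
        · omega
        · unfold pvLex at h h'; omega

-- ===== VERDICT (by name: the statement is the Claim_ definition above) =====
theorem nextGreaterOrEqualIndex_spec : Claim_equal_nextGreaterOrEqualIndex := by
  intro arr _
  unfold Spec_nextGreaterOrEqualIndex
  obtain ⟨hAlen, hAent⟩ := pvA_spec arr
  obtain ⟨hBlen, hBent⟩ := pvB_entries arr
  apply List.ext_getElem (by rw [hAlen, hBlen])
  intro k h1 h2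
  have hk : k < arr.length := by omega
  have hkmem : (k : Int) ∈ pvIdx arr :=
    (pvIdx_mem arr _).mpr ⟨by positivity, by exact_mod_cast hk⟩
  rcases List.mem_iff_getElem.mp hkmem with ⟨j, hj, hjk⟩
  have hjk' : (pvIdx arr).getD j 0 = (k : Int) := by
    rw [List.getD_eq_getElem _ _ hj]; exact hjk
  have hA := hAent j hj
  rw [hjk', Int.toNat_natCast] at hA
  have hspecA : pvSpec arr (k : Int) ((nextGreaterOrEqualIndex arr).getD k 0) := by
    rw [hA]
    have hbr := pv_bridge arr j hj
    rw [hjk'] at hbr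
    exact hbr
  have hspecB := hBent k hk
  have heq := pvSpec_unique arr (k : Int) _ _ hspecA hspecB
  rw [List.getD_eq_getElem _ _ (by omega), List.getD_eq_getElem _ _ (by omega)] at heq
  exact heq
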